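-- pv_equiv track=rewrite | github.com/jmerkle/adventOfCode2023 | 19/functions_day_19.py | apply_workflow_to_part
-- ===== SOURCE A (Python) =====
-- from typing import TypeAlias
--
-- category_indexes = {
--     "x": 0,
--     "m": 1,
--     "a": 2,
--     "s": 3,
-- }
--
-- Part: TypeAlias = tuple[int, int, int, int]
--
-- def apply_predicate_to_part(predicate: str, part: Part) -> bool:
--     category, comparator, *_ = list(predicate)
--     value_int = int(predicate[2:])
--     part_value = part[category_indexes.get(category)]
--     if comparator == ">":
--         return part_value > value_int
--     return part_value < value_int
--
-- def apply_workflow_to_part(workflow: list[str], part: Part) -> str: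
--     first_rule, *remaining_rules = workflow
--     if ":" not in first_rule:
--         return first_rule
--     predicate, next_workflow = first_rule.split(":")
--     if apply_predicate_to_part(predicate, part):
--         return next_workflow
--     else:
--         return apply_workflow_to_part(remaining_rules, part)
-- ===== SOURCE B (Python) =====
-- def apply_workflow_to_part(workflow: list[str], part: tuple[int, int, int, int]) -> str:
--     for rule in workflow:
--         if ":" not in rule:
--             return rule
--         predicate, target = rule.split(":")
--         part_value = part["xmas".index(predicate[0])]
--         threshold = int(predicate[2:])
--         matched = part_value > threshold if predicate[1] == ">" else part_value < threshold
--         if matched: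
--             return target
--     raise ValueError("workflow has no applicable rule")
-- ===== Notes on version B (the rewrite author's own statement) =====
-- stated objective: idiomatic
-- what changed: Replaced A's tail recursion plus the apply_predicate_to_part helper and its module-level index dict by a single for-loop over the rules with the predicate evaluation inlined, using "xmas".index for the category and an explicit ValueError on fall-through.
-- outside the precondition, e.g. on apply_workflow_to_part(['x>5:acc', 'q<:B', 'end'], (9, 1, 1, 1)): A returns 'acc', B returns 'acc'
import Mathlib
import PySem

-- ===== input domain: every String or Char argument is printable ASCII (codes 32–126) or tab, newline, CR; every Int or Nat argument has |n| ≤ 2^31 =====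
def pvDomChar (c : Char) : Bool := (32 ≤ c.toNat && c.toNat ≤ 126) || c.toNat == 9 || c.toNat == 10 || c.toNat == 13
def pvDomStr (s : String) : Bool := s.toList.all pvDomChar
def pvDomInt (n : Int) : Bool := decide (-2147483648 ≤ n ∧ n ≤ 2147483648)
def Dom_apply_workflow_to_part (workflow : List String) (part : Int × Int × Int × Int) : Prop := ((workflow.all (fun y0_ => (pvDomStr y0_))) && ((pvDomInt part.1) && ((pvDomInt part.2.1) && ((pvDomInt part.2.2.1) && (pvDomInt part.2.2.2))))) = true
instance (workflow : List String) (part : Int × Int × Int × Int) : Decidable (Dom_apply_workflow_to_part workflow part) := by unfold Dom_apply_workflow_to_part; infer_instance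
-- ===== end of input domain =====

-- B replaces A's recursion + dict-lookup helper by a single loop over the rules with the
-- predicate evaluation inlined ("xmas".index instead of the dict); objective: idiomatic.

-- ===== PORT A =====
-- tuple indexing part[i]: ported by hand, exact for the indices 0..3 that occur under Pre_
def pvPartGet (part : Int × Int × Int × Int) (i : Int) : Int :=
  if i = 0 then part.1 else if i = 1 then part.2.1 else if i = 2 then part.2.2.1 else part.2.2.2

def category_indexes : PySem.Dict String Int := PySem.Dict.mk [("x", 0), ("m", 1), ("a", 2), ("s", 3)]

def apply_predicate_to_part (predicate : String) (part : Int × Int × Int × Int) : Bool :=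
  match predicate.toList with
  | category :: comparator :: _ =>
    let value_int := (PySem.Int.ofStr? (PySem.Str.slice predicate (some 2) none)).getD 0  -- int(...) raises outside Pre_
    match category_indexes.get? (String.ofList [category]) with
    | some idx =>
      let part_value := pvPartGet part idx
      if comparator == '>' then decide (part_value > value_int) else decide (part_value < value_int)
    | none => false  -- Python raises TypeError (part[None]); outside Pre_
  | _ => false  -- Python raises ValueError unpacking < 2 chars; outside Pre_

def apply_workflow_to_part (workflow : List String) (part : Int × Int × Int × Int) : String :=
  match workflow with
  | [] => ""  -- Python raises ValueError unpacking the empty list; outside Pre_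
  | first_rule :: remaining_rules =>
    if !(PySem.Str.isIn ":" first_rule) then first_rule
    else
      match PySem.Str.split? first_rule ":" with
      | some [predicate, next_workflow] =>
        if apply_predicate_to_part predicate part then next_workflow
        else apply_workflow_to_part remaining_rules part
      | _ => ""  -- Python raises ValueError (split not into exactly 2); outside Pre_

-- ===== PORT B =====
-- tuple indexing part[i] for B (hand port, exact for the indices 0..3 that occur under Pre_)
def pvPartGetB (part : Int × Int × Int × Int) (i : Int) : Int :=
  if i = 3 then part.2.2.2 else if i = 2 then part.2.2.1 else if i = 1 then part.2.1 else part.1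

-- the body of B's for-loop: 'some s' means the loop returns s, 'none' means continue
def pvLoopBody (part : Int × Int × Int × Int) (rule : String) : Option String :=
  if !(PySem.Str.isIn ":" rule) then some rule
  else
    -- 'predicate, target = rule.split(":")': exactly two pieces, else ValueError (outside Pre_)
    let pieces := (PySem.Str.split? rule ":").getD []
    if pieces.length == 2 then
      let predicate := pieces.headD ""
      let target := (pieces.drop 1).headD ""
      let c0 := (PySem.Str.pyGet? predicate 0).getD ' '  -- IndexError outside Pre_
      let c1 := (PySem.Str.pyGet? predicate 1).getD ' '
      let part_value := pvPartGetB part (PySem.Str.find "xmas" (String.ofList [c0]))  -- str.index; ValueError (-1) outside Pre_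
      let threshold := (PySem.Int.ofStr? (PySem.Str.slice predicate (some 2) none)).getD 0
      let matched := if c1 == '>' then decide (part_value > threshold) else decide (part_value < threshold)
      if matched then some target else none
    else none  -- Python raises ValueError; outside Pre_

def apply_workflow_to_part_alt (workflow : List String) (part : Int × Int × Int × Int) : String :=
  (workflow.foldl (fun acc rule =>
      if acc.isSome then acc       -- already returned
      else pvLoopBody part rule) none).getD ""
  -- getD "": the fall-through where B raises ValueError; outside Pre_

-- ===== PRECONDITION & SPEC =====
-- a colon-rule A can evaluate without raising: exactly one ':', predicate of length ≥ 2
-- starting with one of x/m/a/s, and an int()-parsable tail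
def pvValidRule (r : String) : Bool :=
  let pieces := (PySem.Str.split? r ":").getD []
  let predchars := (pieces.headD "").toList
  let c := predchars.headD ' '
  decide (pieces.length = 2) && decide (2 ≤ predchars.length) &&
    (c == 'x' || c == 'm' || c == 'a' || c == 's') &&
    (PySem.Int.ofChars? (predchars.drop 2)).isSome

-- Pre_ asks that some default (colon-free) rule exists and that EVERY colon-rule before the
-- first default one is well-formed; whether A actually reaches a malformed rule (and raises)
-- depends on evaluating the earlier predicates, which a closed-form precondition cannot do,
-- so Pre_ also excludes some inputs where an earlier rule matches first — there A returns and
-- B returns the very same value.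
def Pre_apply_workflow_to_part (workflow : List String) (part : Int × Int × Int × Int) : Prop :=
  (∃ r ∈ workflow, PySem.Str.isIn ":" r = false) ∧
  (∀ r ∈ workflow.takeWhile (fun r => PySem.Str.isIn ":" r), pvValidRule r = true)

instance (workflow : List String) (part : Int × Int × Int × Int) : Decidable (Pre_apply_workflow_to_part workflow part) := by
  unfold Pre_apply_workflow_to_part; infer_instance

def pvWitness_apply_workflow_to_part : List String × (Int × Int × Int × Int) :=
  (["x>5:acc", "m<0:rej", "end"], (10, 1, 1, 1))

def Spec_apply_workflow_to_part (workflow : List String) (part : Int × Int × Int × Int) (out : String) : Prop := out = apply_workflow_to_part_alt workflow part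
instance (workflow : List String) (part : Int × Int × Int × Int) (out : String) : Decidable (Spec_apply_workflow_to_part workflow part out) := by unfold Spec_apply_workflow_to_part; infer_instance

-- ===== CLAIM (what is proved, stated in full; the proofs are below) =====
def Claim_equal_apply_workflow_to_part : Prop := ∀ (workflow : List String) (part : Int × Int × Int × Int), Dom_apply_workflow_to_part workflow part → Pre_apply_workflow_to_part workflow part → Spec_apply_workflow_to_part workflow part (apply_workflow_to_part workflow part)

-- ===== LEMMAS AND PROOFS =====

-- once B's loop has returned, the rest of the fold keeps that value
theorem pv_foldl_some (part : Int × Int × Int × Int) (l : List String) (r : String) :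
    l.foldl (fun acc rule => if acc.isSome then acc else pvLoopBody part rule) (some r) = some r := by
  induction l with
  | nil => rfl
  | cons x xs ih => simpa using ih

-- on a valid colon-rule both ports take the same decision
theorem pv_step_eq (part : Int × Int × Int × Int) (r predicate target : String)
    (hin : PySem.Str.isIn ":" r = true)
    (hsplit : PySem.Str.split? r ":" = some [predicate, target])
    (hvalid : pvValidRule r = true) :
    pvLoopBody part r = if apply_predicate_to_part predicate part then some target else none := by
  have hpieces : (PySem.Str.split? r ":").getD [] = [predicate, target] := by rw [hsplit]; rfl
  simp [pvValidRule, hpieces] at hvalid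
  obtain ⟨⟨hlen, hcx⟩, -⟩ := hvalid
  have hlen2 : 2 ≤ predicate.toList.length := by simpa using hlen
  rcases hc : predicate.toList with _ | ⟨c, _ | ⟨d, rest⟩⟩
  · rw [hc] at hlen2; simp at hlen2
  · rw [hc] at hlen2; simp at hlen2
  · rw [hc] at hcx
    simp at hcx
    have hcm : c = 'x' ∨ c = 'm' ∨ c = 'a' ∨ c = 's' := by tauto
    have h0 : (PySem.List.pyGet? predicate.toList 0).getD ' ' = c := by
      rw [hc]; norm_num
    have h1 : (PySem.List.pyGet? predicate.toList 1).getD ' ' = d := by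
      rw [hc]; norm_num
    simp only [pvLoopBody, hin, Bool.not_true, Bool.false_eq_true, if_false, hpieces,
      apply_predicate_to_part, hc]
    rcases hcm with h | h | h | h <;> subst h
    · have hd : category_indexes.get? (String.ofList ['x']) = some 0 := by decide
      have hf : PySem.Chars.find ['x', 'm', 'a', 's'] ['x'] = 0 := by decide
      simp [hd, hf, h0, h1, pvPartGetB, pvPartGet]
    · have hd : category_indexes.get? (String.ofList ['m']) = some 1 := by decide
      have hf : PySem.Chars.find ['x', 'm', 'a', 's'] ['m'] = 1 := by decide
      simp [hd, hf, h0, h1, pvPartGetB, pvPartGet]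
    · have hd : category_indexes.get? (String.ofList ['a']) = some 2 := by decide
      have hf : PySem.Chars.find ['x', 'm', 'a', 's'] ['a'] = 2 := by decide
      simp [hd, hf, h0, h1, pvPartGetB, pvPartGet]
    · have hd : category_indexes.get? (String.ofList ['s']) = some 3 := by decide
      have hf : PySem.Chars.find ['x', 'm', 'a', 's'] ['s'] = 3 := by decide
      simp [hd, hf, h0, h1, pvPartGetB, pvPartGet]

theorem pv_main (workflow : List String) (part : Int × Int × Int × Int)
    (hpre : Pre_apply_workflow_to_part workflow part) :
    apply_workflow_to_part workflow part = apply_workflow_to_part_alt workflow part := by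
  induction workflow with
  | nil =>
    rcases hpre.1 with ⟨r, hr, -⟩
    exact absurd hr (List.not_mem_nil)
  | cons r rest ih =>
    obtain ⟨⟨w, hw, hwno⟩, hv⟩ := hpre
    by_cases hin : PySem.Str.isIn ":" r = true
    · have hvr : pvValidRule r = true := by
        apply hv
        rw [List.takeWhile_cons, if_pos hin]
        exact List.mem_cons_self
      have hsplit : ∃ predicate target, PySem.Str.split? r ":" = some [predicate, target] := by
        rcases h : PySem.Str.split? r ":" with _ | ⟨_ | ⟨p, _ | ⟨t, _ | _⟩⟩⟩ <;>
          simp only [pvValidRule, h] at hvr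
        · exact absurd hvr (by simp)
        · exact absurd hvr (by simp)
        · exact absurd hvr (by simp)
        · exact ⟨p, t, rfl⟩
        · exact absurd hvr (by simp)
      obtain ⟨predicate, target, hsp⟩ := hsplit
      have hstep := pv_step_eq part r predicate target hin hsp hvr
      have halt : apply_workflow_to_part_alt (r :: rest) part =
          ((rest.foldl (fun acc rule => if acc.isSome then acc else pvLoopBody part rule) (pvLoopBody part r)).getD "") := by
        simp [apply_workflow_to_part_alt, List.foldl_cons]
      rw [halt, hstep]
      simp only [apply_workflow_to_part, hin, Bool.not_true, Bool.false_eq_true, if_false, hsp]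
      by_cases hp : apply_predicate_to_part predicate part
      · simp [hp, pv_foldl_some]
      · simp only [hp, Bool.false_eq_true, if_false]
        have hpre2 : Pre_apply_workflow_to_part rest part := by
          refine ⟨⟨w, ?_, hwno⟩, ?_⟩
          · rcases List.mem_cons.1 hw with h | h
            · subst h; rw [hin] at hwno; cases hwno
            · exact h
          · intro r2 hr2
            apply hv
            rw [List.takeWhile_cons, if_pos hin]
            exact List.mem_cons_of_mem _ hr2
        rw [ih hpre2]
        simp [apply_workflow_to_part_alt]
    · have hin2 : PySem.Str.isIn ":" r = false := by
        cases h : PySem.Str.isIn ":" r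
        · rfl
        · exact absurd h hin
      simp only [apply_workflow_to_part, hin2, Bool.not_false, if_true]
      have hstep : pvLoopBody part r = some r := by
        simp only [pvLoopBody, hin2, Bool.not_false, if_true]
      have halt : apply_workflow_to_part_alt (r :: rest) part =
          ((rest.foldl (fun acc rule => if acc.isSome then acc else pvLoopBody part rule) (pvLoopBody part r)).getD "") := by
        simp [apply_workflow_to_part_alt, List.foldl_cons]
      rw [halt, hstep, pv_foldl_some]
      rfl

-- ===== VERDICT (by name: the statement is the Claim_ definition above) =====
theorem apply_workflow_to_part_spec : Claim_equal_apply_workflow_to_part := by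
  intro workflow part _ hpre
  unfold Spec_apply_workflow_to_part
  exact pv_main workflow part hpre
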